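-- pv_equiv track=rewrite | github.com/xiaospica/mlearnweb | backend/app/services/vnpy/risk_event_service.py | highest_severity
-- ===== SOURCE A (Python) =====
-- from typing import Any, Dict, Iterable, List, Optional, Tuple
--
-- SEVERITY_RANK: Dict[str, int] = {
--     "info": 0,
--     "warning": 1,
--     "error": 2,
--     "critical": 3,
-- }
--
-- def _text(value: Any) -> str:
--     return "" if value is None else str(value)
--
-- def highest_severity(events: Iterable[Dict[str, Any]]) -> Optional[str]:
--     best: Optional[str] = None
--     best_rank = -1
--     for event in events:
--         severity = _text(event.get("severity"))
--         rank = SEVERITY_RANK.get(severity, -1)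
--         if rank > best_rank:
--             best = severity
--             best_rank = rank
--     return best
-- ===== SOURCE B (Python) =====
-- from typing import Any, Dict, Iterable, List, Optional
--
-- SEVERITY_RANK: Dict[str, int] = {
--     "info": 0,
--     "warning": 1,
--     "error": 2,
--     "critical": 3,
-- }
--
-- def _text(value: Any) -> str:
--     return "" if value is None else str(value)
--
-- def highest_severity(events: Iterable[Dict[str, Any]]) -> Optional[str]:
--     present = {_text(event.get("severity")) for event in events}
--     for severity in ("critical", "error", "warning", "info"):
--         if severity in present:
--             return severity
--     return None
-- ===== Notes on version B (the rewrite author's own statement) =====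
-- stated objective: simpler
-- what changed: Replaces the max-rank-tracking accumulator loop with a collect-severities-into-a-set pass followed by a fixed descending scan of the four known severities, returning the first one present; correct because A can only ever return a known severity and each rank is unique.
import Mathlib
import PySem

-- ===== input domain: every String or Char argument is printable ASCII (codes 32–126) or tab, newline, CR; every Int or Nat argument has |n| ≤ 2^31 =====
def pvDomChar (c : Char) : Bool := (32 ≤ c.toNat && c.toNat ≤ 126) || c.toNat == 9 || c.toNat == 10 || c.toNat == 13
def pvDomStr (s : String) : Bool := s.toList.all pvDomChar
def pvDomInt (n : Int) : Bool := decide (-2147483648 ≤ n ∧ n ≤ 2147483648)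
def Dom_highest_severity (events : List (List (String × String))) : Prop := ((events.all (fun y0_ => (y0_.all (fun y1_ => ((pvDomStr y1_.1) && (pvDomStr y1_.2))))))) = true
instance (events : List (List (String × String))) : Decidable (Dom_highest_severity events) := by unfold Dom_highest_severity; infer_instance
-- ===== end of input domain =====

-- B replaces A's max-rank-tracking loop by collecting the severities into a set and scanning the
-- four known severities in descending order (objective: simpler). Equivalence proved on all inputs.

-- ===== PORT A =====
-- SEVERITY_RANK (a module-level dict literal with distinct keys)
def pvSevRank : PySem.Dict String Int :=
  PySem.Dict.mk [("info", 0), ("warning", 1), ("error", 2), ("critical", 3)]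

-- _text(value): "" if value is None else str(value)  (values here are already str)
def pvText (v : Option String) : String := v.getD ""

def highest_severity (events : List (List (String × String))) : Option String :=
  (events.foldl (fun (acc : Option String × Int) event =>
      let severity := pvText ((PySem.Dict.mk event).get? "severity")
      let rank := pvSevRank.getD severity (-1)
      if rank > acc.2 then (some severity, rank) else acc)
    ((none : Option String), (-1 : Int))).1

-- ===== PORT B =====
def highest_severity_alt (events : List (List (String × String))) : Option String :=
  let present : PySem.Set String :=
    PySem.Set.ofList (events.map (fun event => pvText ((PySem.Dict.mk event).get? "severity")))
  if present.contains "critical" then some "critical"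
  else if present.contains "error" then some "error"
  else if present.contains "warning" then some "warning"
  else if present.contains "info" then some "info"
  else none

-- ===== PRECONDITION & SPEC =====
def Spec_highest_severity (events : List (List (String × String))) (out : Option String) : Prop := out = highest_severity_alt events
instance (events : List (List (String × String))) (out : Option String) : Decidable (Spec_highest_severity events out) := by unfold Spec_highest_severity; infer_instance

-- ===== CLAIM (what is proved, stated in full; the proofs are below) =====
def Claim_equal_highest_severity : Prop := ∀ (events : List (List (String × String))), Dom_highest_severity events → Spec_highest_severity events (highest_severity events)

-- ===== LEMMAS AND PROOFS =====

-- the severity string extracted from one event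
def pvSev (event : List (String × String)) : String :=
  pvText ((PySem.Dict.mk event).get? "severity")

-- rank of a severity string
def pvRnk (s : String) : Int := pvSevRank.getD s (-1)

-- the maximal rank present (A's best_rank at the end)
def pvM (events : List (List (String × String))) : Int :=
  events.foldl (fun a e => max a (pvRnk (pvSev e))) (-1)

-- the severity string determined by a rank
def pvDecode (r : Int) : Option String :=
  if r = 3 then some "critical" else if r = 2 then some "error"
  else if r = 1 then some "warning" else if r = 0 then some "info" else none

theorem pvRnk_eq (s : String) :
    pvRnk s = if s = "info" then 0 else if s = "warning" then 1
      else if s = "error" then 2 else if s = "critical" then 3 else -1 := by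
  by_cases h1 : s = "info"
  · simp [pvRnk, pvSevRank, PySem.Dict.getD, PySem.Dict.get?, h1]
  by_cases h2 : s = "warning"
  · simp [pvRnk, pvSevRank, PySem.Dict.getD, PySem.Dict.get?, List.find?, h2]
  by_cases h3 : s = "error"
  · simp [pvRnk, pvSevRank, PySem.Dict.getD, PySem.Dict.get?, List.find?, h3]
  by_cases h4 : s = "critical"
  · simp [pvRnk, pvSevRank, PySem.Dict.getD, PySem.Dict.get?, List.find?, h4]
  simp [pvRnk, pvSevRank, PySem.Dict.getD, PySem.Dict.get?, List.find?, h1, h2, h3, h4,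
    beq_eq_false_iff_ne.mpr (Ne.symm h1), beq_eq_false_iff_ne.mpr (Ne.symm h2),
    beq_eq_false_iff_ne.mpr (Ne.symm h3), beq_eq_false_iff_ne.mpr (Ne.symm h4)]

theorem pvRnk_range (s : String) :
    pvRnk s = -1 ∨ pvRnk s = 0 ∨ pvRnk s = 1 ∨ pvRnk s = 2 ∨ pvRnk s = 3 := by
  rw [pvRnk_eq]; split_ifs <;> simp

theorem pvDecode_rnk (s : String) (h : 0 ≤ pvRnk s) : pvDecode (pvRnk s) = some s := by
  rw [pvRnk_eq] at *
  by_cases h1 : s = "info" <;> by_cases h2 : s = "warning" <;>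
    by_cases h3 : s = "error" <;> by_cases h4 : s = "critical" <;>
    simp_all [pvDecode]

theorem pvLoopA (l : List (List (String × String))) :
    ∀ r : Int, (r = -1 ∨ r = 0 ∨ r = 1 ∨ r = 2 ∨ r = 3) →
    l.foldl (fun (acc : Option String × Int) e =>
        if pvRnk (pvSev e) > acc.2 then (some (pvSev e), pvRnk (pvSev e)) else acc)
      (pvDecode r, r)
    = (pvDecode (l.foldl (fun a e => max a (pvRnk (pvSev e))) r),
       l.foldl (fun a e => max a (pvRnk (pvSev e))) r) := by
  induction l with
  | nil => intro r _; simp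
  | cons e l ih =>
    intro r hr
    have hk := pvRnk_range (pvSev e)
    simp only [List.foldl_cons]
    by_cases h : pvRnk (pvSev e) > r
    · have hk0 : 0 ≤ pvRnk (pvSev e) := by rcases hk with hk | hk | hk | hk | hk <;> omega
      have hmax : max r (pvRnk (pvSev e)) = pvRnk (pvSev e) := max_eq_right h.le
      have hdec := pvDecode_rnk (pvSev e) hk0
      rw [if_pos h, hmax, ← hdec]
      exact ih _ (by rcases hk with hk | hk | hk | hk | hk <;> omega)
    · have hmax : max r (pvRnk (pvSev e)) = r := max_eq_left (by omega)
      rw [if_neg h, hmax]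
      exact ih r hr

theorem pvA_eq (events : List (List (String × String))) :
    highest_severity events = pvDecode (pvM events) := by
  show (events.foldl (fun (acc : Option String × Int) e =>
      if pvRnk (pvSev e) > acc.2 then (some (pvSev e), pvRnk (pvSev e)) else acc)
      (pvDecode (-1), (-1 : Int))).1 = pvDecode (pvM events)
  rw [pvLoopA events (-1) (by norm_num)]
  rfl

theorem pvM_mem (events : List (List (String × String))) :
    pvM events = -1 ∨ ∃ e ∈ events, pvM events = pvRnk (pvSev e) := by
  unfold pvM
  induction events using List.reverseRecOn with
  | nil => left; rfl
  | append_singleton l e ih =>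
    rw [List.foldl_append]
    simp only [List.foldl_cons, List.foldl_nil]
    rcases le_or_gt (pvRnk (pvSev e)) (l.foldl (fun a e => max a (pvRnk (pvSev e))) (-1)) with h | h
    · rw [max_eq_left h]
      rcases ih with h1 | ⟨e', he', h1⟩
      · left; exact h1
      · right; exact ⟨e', by simp [he'], h1⟩
    · right; exact ⟨e, by simp, (max_eq_right h.le).symm ▸ rfl⟩

theorem pvM_ub (events : List (List (String × String))) (e : List (String × String))
    (he : e ∈ events) : pvRnk (pvSev e) ≤ pvM events := by
  exact (PySem.List.le_foldl_max (events.map (fun e => pvRnk (pvSev e))) (-1)).2 _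
    (List.mem_map_of_mem he) |>.trans_eq (by unfold pvM; rw [List.foldl_map])

theorem pvM_range (events : List (List (String × String))) :
    pvM events = -1 ∨ pvM events = 0 ∨ pvM events = 1 ∨ pvM events = 2 ∨ pvM events = 3 := by
  rcases pvM_mem events with h | ⟨e, _, h⟩
  · left; exact h
  · rw [h]; exact pvRnk_range _

theorem pvContains_iff (events : List (List (String × String))) (s : String) :
    (PySem.Set.ofList (events.map (fun event => pvText ((PySem.Dict.mk event).get? "severity")))).contains s
      = true ↔ ∃ e ∈ events, pvSev e = s := by
  rw [PySem.Set.contains, List.contains_iff_mem, PySem.Set.mem_ofList, List.mem_map]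
  constructor
  · rintro ⟨e, he, h⟩; exact ⟨e, he, h⟩
  · rintro ⟨e, he, h⟩; exact ⟨e, he, h⟩

theorem pvB_eq (events : List (List (String × String))) :
    highest_severity_alt events = pvDecode (pvM events) := by
  simp only [highest_severity_alt]
  have hrng := pvM_range events
  by_cases hc : ∃ e ∈ events, pvSev e = "critical"
  · obtain ⟨e, he, hs⟩ := hc
    have h3 : pvRnk (pvSev e) = 3 := by rw [hs, pvRnk_eq]; decide
    have := pvM_ub events e he
    have hm : pvM events = 3 := by omega
    rw [if_pos ((pvContains_iff events "critical").2 ⟨e, he, hs⟩), hm]; rfl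
  · rw [if_neg (by simpa using (not_iff_not.2 (pvContains_iff events "critical")).2 hc)]
    have hne3 : pvM events ≠ 3 := by
      rcases pvM_mem events with h | ⟨e, he, h⟩
      · omega
      · intro h3
        apply hc
        refine ⟨e, he, ?_⟩
        rw [h] at h3
        revert h3; rw [pvRnk_eq]; split_ifs <;> simp_all
    by_cases herr : ∃ e ∈ events, pvSev e = "error"
    · obtain ⟨e, he, hs⟩ := herr
      have h2 : pvRnk (pvSev e) = 2 := by rw [hs, pvRnk_eq]; decide
      have := pvM_ub events e he
      have hm : pvM events = 2 := by omega
      rw [if_pos ((pvContains_iff events "error").2 ⟨e, he, hs⟩), hm]; rfl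
    · rw [if_neg (by simpa using (not_iff_not.2 (pvContains_iff events "error")).2 herr)]
      have hne2 : pvM events ≠ 2 := by
        rcases pvM_mem events with h | ⟨e, he, h⟩
        · omega
        · intro h2
          apply herr
          refine ⟨e, he, ?_⟩
          rw [h] at h2
          revert h2; rw [pvRnk_eq]; split_ifs <;> simp_all
      by_cases hw : ∃ e ∈ events, pvSev e = "warning"
      · obtain ⟨e, he, hs⟩ := hw
        have h1 : pvRnk (pvSev e) = 1 := by rw [hs, pvRnk_eq]; decide
        have := pvM_ub events e he
        have hm : pvM events = 1 := by omega
        rw [if_pos ((pvContains_iff events "warning").2 ⟨e, he, hs⟩), hm]; rfl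
      · rw [if_neg (by simpa using (not_iff_not.2 (pvContains_iff events "warning")).2 hw)]
        have hne1 : pvM events ≠ 1 := by
          rcases pvM_mem events with h | ⟨e, he, h⟩
          · omega
          · intro h1
            apply hw
            refine ⟨e, he, ?_⟩
            rw [h] at h1
            revert h1; rw [pvRnk_eq]; split_ifs <;> simp_all
        by_cases hi : ∃ e ∈ events, pvSev e = "info"
        · obtain ⟨e, he, hs⟩ := hi
          have h0 : pvRnk (pvSev e) = 0 := by rw [hs, pvRnk_eq]; decide
          have := pvM_ub events e he
          have hm : pvM events = 0 := by omega
          rw [if_pos ((pvContains_iff events "info").2 ⟨e, he, hs⟩), hm]; rfl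
        · rw [if_neg (by simpa using (not_iff_not.2 (pvContains_iff events "info")).2 hi)]
          have hne0 : pvM events ≠ 0 := by
            rcases pvM_mem events with h | ⟨e, he, h⟩
            · omega
            · intro h0
              apply hi
              refine ⟨e, he, ?_⟩
              rw [h] at h0
              revert h0; rw [pvRnk_eq]; split_ifs <;> simp_all
          have : pvM events = -1 := by omega
          rw [this]; rfl

-- ===== VERDICT (by name: the statement is the Claim_ definition above) =====
theorem highest_severity_spec : Claim_equal_highest_severity := by
  intro events _
  unfold Spec_highest_severity
  rw [pvA_eq, pvB_eq]
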